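-- pv_equiv track=rewrite | github.com/pypi-data/pypi-mirror-397 | packages/mcp-ambari-api/mcp_ambari_api-3.5.2.tar.gz/mcp_ambari_api-3.5.2/src/mcp_ambari_api/functions.py | canonicalize_app_id
-- ===== SOURCE A (Python) =====
-- from typing import Dict, Optional, Tuple, List, Any, Iterable, Set
--
-- APP_SYNONYMS: Dict[str, Tuple[str, ...]] = {
--     "HOST": ("host", "hardware", "system"),
--     "ambari_server": ("ambari", "server", "ambari_server"),
--     "namenode": ("namenode", "hdfs", "nn", "name node"),
--     "datanode": ("datanode", "dn", "data node"),
--     "nodemanager": ("nodemanager", "nm", "node manager"),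
--     "resourcemanager": ("resourcemanager", "rm", "resource manager", "yarn"),
-- }
--
-- EXCLUDED_APP_IDS = {"ams-hbase", "amssmoketestfake"}
--
-- def _is_excluded_app(app_id: Optional[str]) -> bool:
--     if not app_id:
--         return False
--     return app_id.strip().lower() in EXCLUDED_APP_IDS
--
-- def canonicalize_app_id(app_id: Optional[str], lookup: Optional[Dict[str, str]] = None) -> Optional[str]:
--     """Resolve user-provided appId into an AMS-recognised identifier."""
--
--     if not app_id or not isinstance(app_id, str):
--         return None
--
--     normalized = app_id.strip()
--     if not normalized:
--         return None
--
--     lowered = normalized.lower()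
--
--     if lookup and lowered in lookup:
--         candidate = lookup[lowered]
--         if _is_excluded_app(candidate):
--             return None
--         return candidate
--
--     for canonical, synonyms in APP_SYNONYMS.items():
--         candidates = {canonical.lower(), *(syn.lower() for syn in synonyms)}
--         if lowered in candidates:
--             if lookup and canonical.lower() in lookup:
--                 resolved = lookup[canonical.lower()]
--                 if _is_excluded_app(resolved):
--                     return None
--                 return resolved
--             if _is_excluded_app(canonical):
--                 return None
--             return canonical
--
--     if _is_excluded_app(normalized):
--         return None
--
--     return normalized
-- ===== SOURCE B (Python) =====
-- from typing import Dict, Optional, Tuple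
--
-- APP_SYNONYMS: Dict[str, Tuple[str, ...]] = {
--     "HOST": ("host", "hardware", "system"),
--     "ambari_server": ("ambari", "server", "ambari_server"),
--     "namenode": ("namenode", "hdfs", "nn", "name node"),
--     "datanode": ("datanode", "dn", "data node"),
--     "nodemanager": ("nodemanager", "nm", "node manager"),
--     "resourcemanager": ("resourcemanager", "rm", "resource manager", "yarn"),
-- }
--
-- EXCLUDED_APP_IDS = {"ams-hbase", "amssmoketestfake"}
--
-- # Reverse index built once: every lowered synonym (and lowered canonical) -> canonical key.
-- _REVERSE_INDEX: Dict[str, str] = {}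
-- for _canon, _syns in APP_SYNONYMS.items():
--     for _key in (_canon.lower(), *(_s.lower() for _s in _syns)):
--         _REVERSE_INDEX.setdefault(_key, _canon)
--
--
-- def _resolve(value: Optional[str]) -> Optional[str]:
--     """Drop values on the AMS exclusion list; otherwise pass through."""
--     if value and value.strip().lower() in EXCLUDED_APP_IDS:
--         return None
--     return value
--
--
-- def canonicalize_app_id(app_id: Optional[str], lookup: Optional[Dict[str, str]] = None) -> Optional[str]:
--     if not app_id or not isinstance(app_id, str):
--         return None
--     normalized = app_id.strip()
--     if not normalized:
--         return None
--     lowered = normalized.lower()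
--     if lookup and lowered in lookup:
--         return _resolve(lookup[lowered])
--     canonical = _REVERSE_INDEX.get(lowered)
--     if canonical is None:
--         return _resolve(normalized)
--     if lookup and canonical.lower() in lookup:
--         return _resolve(lookup[canonical.lower()])
--     return _resolve(canonical)
-- ===== Notes on version B (the rewrite author's own statement) =====
-- stated objective: idiomatic
-- what changed: A's per-call loop over APP_SYNONYMS that builds a candidate set for every group is replaced by a reverse index dict (lowered synonym -> canonical) precomputed once at module load and consulted with a single get.
import Mathlib
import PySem

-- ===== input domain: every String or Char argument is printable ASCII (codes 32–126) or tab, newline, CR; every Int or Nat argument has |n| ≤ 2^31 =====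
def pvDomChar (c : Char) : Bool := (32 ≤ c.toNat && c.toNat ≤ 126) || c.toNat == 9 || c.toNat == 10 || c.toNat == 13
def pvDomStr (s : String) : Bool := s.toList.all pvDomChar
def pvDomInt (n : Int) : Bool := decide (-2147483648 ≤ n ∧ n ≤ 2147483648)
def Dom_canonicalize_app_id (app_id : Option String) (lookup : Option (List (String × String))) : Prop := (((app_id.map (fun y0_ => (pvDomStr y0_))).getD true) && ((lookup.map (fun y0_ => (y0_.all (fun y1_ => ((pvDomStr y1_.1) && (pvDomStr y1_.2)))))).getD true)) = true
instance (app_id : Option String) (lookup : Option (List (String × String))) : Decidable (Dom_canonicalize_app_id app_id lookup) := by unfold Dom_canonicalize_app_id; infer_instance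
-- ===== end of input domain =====

-- B replaces A's per-call scan over APP_SYNONYMS (building a set each iteration) with a
-- reverse index built once, looked up directly (objective: idiomatic/alternative, same cost class).


-- shared module constants
def pvAppSynonyms : List (String × List String) :=
  [("HOST", ["host", "hardware", "system"]),
   ("ambari_server", ["ambari", "server", "ambari_server"]),
   ("namenode", ["namenode", "hdfs", "nn", "name node"]),
   ("datanode", ["datanode", "dn", "data node"]),
   ("nodemanager", ["nodemanager", "nm", "node manager"]),
   ("resourcemanager", ["resourcemanager", "rm", "resource manager", "yarn"])]

def pvExcludedAppIds : PySem.Set String := PySem.Set.ofList ["ams-hbase", "amssmoketestfake"]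

-- truthiness test 'lookup and k in lookup' (lookup : Optional[dict])
def pvLookupHas (lookup : Option (List (String × String))) (k : String) : Bool :=
  match lookup with
  | none => false
  | some l => !l.isEmpty && (PySem.Dict.mk l).contains k

-- lookup[k]; only used where pvLookupHas guarantees presence
def pvLookupGet (lookup : Option (List (String × String))) (k : String) : String :=
  ((PySem.Dict.mk (lookup.getD [])).get? k).getD ""

-- ===== PORT A =====
def pvIsExcludedApp (app_id : Option String) : Bool :=
  match app_id with
  | none => false
  | some s => if s.isEmpty then false
              else pvExcludedAppIds.contains (PySem.Str.lower (PySem.Str.strip s))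

-- the 'for canonical, synonyms in APP_SYNONYMS.items()' loop, with the post-loop fallthrough
def pvSynScan (lookup : Option (List (String × String))) (lowered normalized : String) :
    List (String × List String) → Option String
  | [] => if pvIsExcludedApp (some normalized) then none else some normalized
  | (canonical, synonyms) :: rest =>
      let candidates : PySem.Set String :=
        PySem.Set.ofList (PySem.Str.lower canonical :: synonyms.map PySem.Str.lower)
      if candidates.contains lowered then
        if pvLookupHas lookup (PySem.Str.lower canonical) then
          let resolved := pvLookupGet lookup (PySem.Str.lower canonical)
          if pvIsExcludedApp (some resolved) then none else some resolved
        else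
          if pvIsExcludedApp (some canonical) then none else some canonical
      else pvSynScan lookup lowered normalized rest

def canonicalize_app_id (app_id : Option String) (lookup : Option (List (String × String))) : Option String :=
  match app_id with
  | none => none
  | some s =>
    if s.isEmpty then none else
    let normalized := PySem.Str.strip s
    if normalized.isEmpty then none else
    let lowered := PySem.Str.lower normalized
    if pvLookupHas lookup lowered then
      let candidate := pvLookupGet lookup lowered
      if pvIsExcludedApp (some candidate) then none else some candidate
    else
      pvSynScan lookup lowered normalized pvAppSynonyms

-- ===== PORT B =====
-- _REVERSE_INDEX, built once by Source B's module-level loop (setdefault keeps the first binding)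
def pvReverseIndex : PySem.Dict String String :=
  pvAppSynonyms.foldl
    (fun d p =>
      (PySem.Str.lower p.1 :: p.2.map PySem.Str.lower).foldl
        (fun d k => d.setdefault k p.1) d)
    PySem.Dict.empty

def pvResolve (value : String) : Option String :=
  if !value.isEmpty && pvExcludedAppIds.contains (PySem.Str.lower (PySem.Str.strip value)) then
    none
  else some value

def canonicalize_app_id_alt (app_id : Option String) (lookup : Option (List (String × String))) : Option String :=
  match app_id with
  | none => none
  | some s =>
    if s.isEmpty then none else
    let normalized := PySem.Str.strip s
    if normalized.isEmpty then none else
    let lowered := PySem.Str.lower normalized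
    if pvLookupHas lookup lowered then
      pvResolve (pvLookupGet lookup lowered)
    else
      match pvReverseIndex.get? lowered with
      | none => pvResolve normalized
      | some canonical =>
        if pvLookupHas lookup (PySem.Str.lower canonical) then
          pvResolve (pvLookupGet lookup (PySem.Str.lower canonical))
        else pvResolve canonical

-- ===== PRECONDITION & SPEC =====
def Spec_canonicalize_app_id (app_id : Option String) (lookup : Option (List (String × String))) (out : Option String) : Prop := out = canonicalize_app_id_alt app_id lookup
instance (app_id : Option String) (lookup : Option (List (String × String))) (out : Option String) : Decidable (Spec_canonicalize_app_id app_id lookup out) := by unfold Spec_canonicalize_app_id; infer_instance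

-- ===== CLAIM (what is proved, stated in full; the proofs are below) =====
def Claim_equal_canonicalize_app_id : Prop := ∀ (app_id : Option String) (lookup : Option (List (String × String))), Dom_canonicalize_app_id app_id lookup → Spec_canonicalize_app_id app_id lookup (canonicalize_app_id app_id lookup)

-- ===== LEMMAS AND PROOFS =====

theorem pvResolve_eq (v : String) :
    pvResolve v = if pvIsExcludedApp (some v) then none else some v := by
  unfold pvResolve pvIsExcludedApp
  by_cases h : v.isEmpty <;> simp [h]

theorem pvLow0 : PySem.Str.lower "HOST" = "host" := by decide
theorem pvLow1 : PySem.Str.lower "host" = "host" := by decide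
theorem pvLow2 : PySem.Str.lower "hardware" = "hardware" := by decide
theorem pvLow3 : PySem.Str.lower "system" = "system" := by decide
theorem pvLow4 : PySem.Str.lower "ambari_server" = "ambari_server" := by decide
theorem pvLow5 : PySem.Str.lower "ambari" = "ambari" := by decide
theorem pvLow6 : PySem.Str.lower "server" = "server" := by decide
theorem pvLow7 : PySem.Str.lower "namenode" = "namenode" := by decide
theorem pvLow8 : PySem.Str.lower "hdfs" = "hdfs" := by decide
theorem pvLow9 : PySem.Str.lower "nn" = "nn" := by decide
theorem pvLow10 : PySem.Str.lower "name node" = "name node" := by decide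
theorem pvLow11 : PySem.Str.lower "datanode" = "datanode" := by decide
theorem pvLow12 : PySem.Str.lower "dn" = "dn" := by decide
theorem pvLow13 : PySem.Str.lower "data node" = "data node" := by decide
theorem pvLow14 : PySem.Str.lower "nodemanager" = "nodemanager" := by decide
theorem pvLow15 : PySem.Str.lower "nm" = "nm" := by decide
theorem pvLow16 : PySem.Str.lower "node manager" = "node manager" := by decide
theorem pvLow17 : PySem.Str.lower "resourcemanager" = "resourcemanager" := by decide
theorem pvLow18 : PySem.Str.lower "rm" = "rm" := by decide
theorem pvLow19 : PySem.Str.lower "resource manager" = "resource manager" := by decide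
theorem pvLow20 : PySem.Str.lower "yarn" = "yarn" := by decide

theorem pvReverseIndex_eq : pvReverseIndex = PySem.Dict.mk [("host", "HOST"), ("hardware", "HOST"), ("system", "HOST"), ("ambari_server", "ambari_server"), ("ambari", "ambari_server"), ("server", "ambari_server"), ("namenode", "namenode"), ("hdfs", "namenode"), ("nn", "namenode"), ("name node", "namenode"), ("datanode", "datanode"), ("dn", "datanode"), ("data node", "datanode"), ("nodemanager", "nodemanager"), ("nm", "nodemanager"), ("node manager", "nodemanager"), ("resourcemanager", "resourcemanager"), ("rm", "resourcemanager"), ("resource manager", "resourcemanager"), ("yarn", "resourcemanager")] := by decide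

theorem pvSynScan_eq (lookup : Option (List (String × String))) (lowered normalized : String) :
    pvSynScan lookup lowered normalized pvAppSynonyms =
      match pvReverseIndex.get? lowered with
      | none => pvResolve normalized
      | some canonical =>
        if pvLookupHas lookup (PySem.Str.lower canonical) then
          pvResolve (pvLookupGet lookup (PySem.Str.lower canonical))
        else pvResolve canonical := by
  rw [pvReverseIndex_eq]
  by_cases h1 : lowered = "host"
  · simp [pvSynScan, pvAppSynonyms, PySem.Dict.get?_mk_cons, pvResolve_eq, pvLow0, pvLow1, pvLow2, pvLow3, pvLow4, pvLow5, pvLow6, pvLow7, pvLow8, pvLow9, pvLow10, pvLow11, pvLow12, pvLow13, pvLow14, pvLow15, pvLow16, pvLow17, pvLow18, pvLow19, pvLow20, h1]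
  by_cases h2 : lowered = "hardware"
  · simp [pvSynScan, pvAppSynonyms, PySem.Dict.get?_mk_cons, pvResolve_eq, pvLow0, pvLow1, pvLow2, pvLow3, pvLow4, pvLow5, pvLow6, pvLow7, pvLow8, pvLow9, pvLow10, pvLow11, pvLow12, pvLow13, pvLow14, pvLow15, pvLow16, pvLow17, pvLow18, pvLow19, pvLow20, h1, h2]
  by_cases h3 : lowered = "system"
  · simp [pvSynScan, pvAppSynonyms, PySem.Dict.get?_mk_cons, pvResolve_eq, pvLow0, pvLow1, pvLow2, pvLow3, pvLow4, pvLow5, pvLow6, pvLow7, pvLow8, pvLow9, pvLow10, pvLow11, pvLow12, pvLow13, pvLow14, pvLow15, pvLow16, pvLow17, pvLow18, pvLow19, pvLow20, h1, h2, h3]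
  by_cases h4 : lowered = "ambari_server"
  · simp [pvSynScan, pvAppSynonyms, PySem.Dict.get?_mk_cons, pvResolve_eq, pvLow0, pvLow1, pvLow2, pvLow3, pvLow4, pvLow5, pvLow6, pvLow7, pvLow8, pvLow9, pvLow10, pvLow11, pvLow12, pvLow13, pvLow14, pvLow15, pvLow16, pvLow17, pvLow18, pvLow19, pvLow20, h1, h2, h3, h4]
  by_cases h5 : lowered = "ambari"
  · simp [pvSynScan, pvAppSynonyms, PySem.Dict.get?_mk_cons, pvResolve_eq, pvLow0, pvLow1, pvLow2, pvLow3, pvLow4, pvLow5, pvLow6, pvLow7, pvLow8, pvLow9, pvLow10, pvLow11, pvLow12, pvLow13, pvLow14, pvLow15, pvLow16, pvLow17, pvLow18, pvLow19, pvLow20, h1, h2, h3, h4, h5]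
  by_cases h6 : lowered = "server"
  · simp [pvSynScan, pvAppSynonyms, PySem.Dict.get?_mk_cons, pvResolve_eq, pvLow0, pvLow1, pvLow2, pvLow3, pvLow4, pvLow5, pvLow6, pvLow7, pvLow8, pvLow9, pvLow10, pvLow11, pvLow12, pvLow13, pvLow14, pvLow15, pvLow16, pvLow17, pvLow18, pvLow19, pvLow20, h1, h2, h3, h4, h5, h6]
  by_cases h7 : lowered = "namenode"
  · simp [pvSynScan, pvAppSynonyms, PySem.Dict.get?_mk_cons, pvResolve_eq, pvLow0, pvLow1, pvLow2, pvLow3, pvLow4, pvLow5, pvLow6, pvLow7, pvLow8, pvLow9, pvLow10, pvLow11, pvLow12, pvLow13, pvLow14, pvLow15, pvLow16, pvLow17, pvLow18, pvLow19, pvLow20, h1, h2, h3, h4, h5, h6, h7]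
  by_cases h8 : lowered = "hdfs"
  · simp [pvSynScan, pvAppSynonyms, PySem.Dict.get?_mk_cons, pvResolve_eq, pvLow0, pvLow1, pvLow2, pvLow3, pvLow4, pvLow5, pvLow6, pvLow7, pvLow8, pvLow9, pvLow10, pvLow11, pvLow12, pvLow13, pvLow14, pvLow15, pvLow16, pvLow17, pvLow18, pvLow19, pvLow20, h1, h2, h3, h4, h5, h6, h7, h8]
  by_cases h9 : lowered = "nn"
  · simp [pvSynScan, pvAppSynonyms, PySem.Dict.get?_mk_cons, pvResolve_eq, pvLow0, pvLow1, pvLow2, pvLow3, pvLow4, pvLow5, pvLow6, pvLow7, pvLow8, pvLow9, pvLow10, pvLow11, pvLow12, pvLow13, pvLow14, pvLow15, pvLow16, pvLow17, pvLow18, pvLow19, pvLow20, h1, h2, h3, h4, h5, h6, h7, h8, h9]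
  by_cases h10 : lowered = "name node"
  · simp [pvSynScan, pvAppSynonyms, PySem.Dict.get?_mk_cons, pvResolve_eq, pvLow0, pvLow1, pvLow2, pvLow3, pvLow4, pvLow5, pvLow6, pvLow7, pvLow8, pvLow9, pvLow10, pvLow11, pvLow12, pvLow13, pvLow14, pvLow15, pvLow16, pvLow17, pvLow18, pvLow19, pvLow20, h1, h2, h3, h4, h5, h6, h7, h8, h9, h10]
  by_cases h11 : lowered = "datanode"
  · simp [pvSynScan, pvAppSynonyms, PySem.Dict.get?_mk_cons, pvResolve_eq, pvLow0, pvLow1, pvLow2, pvLow3, pvLow4, pvLow5, pvLow6, pvLow7, pvLow8, pvLow9, pvLow10, pvLow11, pvLow12, pvLow13, pvLow14, pvLow15, pvLow16, pvLow17, pvLow18, pvLow19, pvLow20, h1, h2, h3, h4, h5, h6, h7, h8, h9, h10, h11]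
  by_cases h12 : lowered = "dn"
  · simp [pvSynScan, pvAppSynonyms, PySem.Dict.get?_mk_cons, pvResolve_eq, pvLow0, pvLow1, pvLow2, pvLow3, pvLow4, pvLow5, pvLow6, pvLow7, pvLow8, pvLow9, pvLow10, pvLow11, pvLow12, pvLow13, pvLow14, pvLow15, pvLow16, pvLow17, pvLow18, pvLow19, pvLow20, h1, h2, h3, h4, h5, h6, h7, h8, h9, h10, h11, h12]
  by_cases h13 : lowered = "data node"
  · simp [pvSynScan, pvAppSynonyms, PySem.Dict.get?_mk_cons, pvResolve_eq, pvLow0, pvLow1, pvLow2, pvLow3, pvLow4, pvLow5, pvLow6, pvLow7, pvLow8, pvLow9, pvLow10, pvLow11, pvLow12, pvLow13, pvLow14, pvLow15, pvLow16, pvLow17, pvLow18, pvLow19, pvLow20, h1, h2, h3, h4, h5, h6, h7, h8, h9, h10, h11, h12, h13]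
  by_cases h14 : lowered = "nodemanager"
  · simp [pvSynScan, pvAppSynonyms, PySem.Dict.get?_mk_cons, pvResolve_eq, pvLow0, pvLow1, pvLow2, pvLow3, pvLow4, pvLow5, pvLow6, pvLow7, pvLow8, pvLow9, pvLow10, pvLow11, pvLow12, pvLow13, pvLow14, pvLow15, pvLow16, pvLow17, pvLow18, pvLow19, pvLow20, h1, h2, h3, h4, h5, h6, h7, h8, h9, h10, h11, h12, h13, h14]
  by_cases h15 : lowered = "nm"
  · simp [pvSynScan, pvAppSynonyms, PySem.Dict.get?_mk_cons, pvResolve_eq, pvLow0, pvLow1, pvLow2, pvLow3, pvLow4, pvLow5, pvLow6, pvLow7, pvLow8, pvLow9, pvLow10, pvLow11, pvLow12, pvLow13, pvLow14, pvLow15, pvLow16, pvLow17, pvLow18, pvLow19, pvLow20, h1, h2, h3, h4, h5, h6, h7, h8, h9, h10, h11, h12, h13, h14, h15]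
  by_cases h16 : lowered = "node manager"
  · simp [pvSynScan, pvAppSynonyms, PySem.Dict.get?_mk_cons, pvResolve_eq, pvLow0, pvLow1, pvLow2, pvLow3, pvLow4, pvLow5, pvLow6, pvLow7, pvLow8, pvLow9, pvLow10, pvLow11, pvLow12, pvLow13, pvLow14, pvLow15, pvLow16, pvLow17, pvLow18, pvLow19, pvLow20, h1, h2, h3, h4, h5, h6, h7, h8, h9, h10, h11, h12, h13, h14, h15, h16]
  by_cases h17 : lowered = "resourcemanager"
  · simp [pvSynScan, pvAppSynonyms, PySem.Dict.get?_mk_cons, pvResolve_eq, pvLow0, pvLow1, pvLow2, pvLow3, pvLow4, pvLow5, pvLow6, pvLow7, pvLow8, pvLow9, pvLow10, pvLow11, pvLow12, pvLow13, pvLow14, pvLow15, pvLow16, pvLow17, pvLow18, pvLow19, pvLow20, h1, h2, h3, h4, h5, h6, h7, h8, h9, h10, h11, h12, h13, h14, h15, h16, h17]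
  by_cases h18 : lowered = "rm"
  · simp [pvSynScan, pvAppSynonyms, PySem.Dict.get?_mk_cons, pvResolve_eq, pvLow0, pvLow1, pvLow2, pvLow3, pvLow4, pvLow5, pvLow6, pvLow7, pvLow8, pvLow9, pvLow10, pvLow11, pvLow12, pvLow13, pvLow14, pvLow15, pvLow16, pvLow17, pvLow18, pvLow19, pvLow20, h1, h2, h3, h4, h5, h6, h7, h8, h9, h10, h11, h12, h13, h14, h15, h16, h17, h18]
  by_cases h19 : lowered = "resource manager"
  · simp [pvSynScan, pvAppSynonyms, PySem.Dict.get?_mk_cons, pvResolve_eq, pvLow0, pvLow1, pvLow2, pvLow3, pvLow4, pvLow5, pvLow6, pvLow7, pvLow8, pvLow9, pvLow10, pvLow11, pvLow12, pvLow13, pvLow14, pvLow15, pvLow16, pvLow17, pvLow18, pvLow19, pvLow20, h1, h2, h3, h4, h5, h6, h7, h8, h9, h10, h11, h12, h13, h14, h15, h16, h17, h18, h19]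
  by_cases h20 : lowered = "yarn"
  · simp [pvSynScan, pvAppSynonyms, PySem.Dict.get?_mk_cons, pvResolve_eq, pvLow0, pvLow1, pvLow2, pvLow3, pvLow4, pvLow5, pvLow6, pvLow7, pvLow8, pvLow9, pvLow10, pvLow11, pvLow12, pvLow13, pvLow14, pvLow15, pvLow16, pvLow17, pvLow18, pvLow19, pvLow20, h1, h2, h3, h4, h5, h6, h7, h8, h9, h10, h11, h12, h13, h14, h15, h16, h17, h18, h19, h20]
  simp [pvSynScan, pvAppSynonyms, PySem.Dict.get?_mk_cons, PySem.Dict.get?, PySem.Dict.get?_empty, pvResolve_eq, pvLow0, pvLow1, pvLow2, pvLow3, pvLow4, pvLow5, pvLow6, pvLow7, pvLow8, pvLow9, pvLow10, pvLow11, pvLow12, pvLow13, pvLow14, pvLow15, pvLow16, pvLow17, pvLow18, pvLow19, pvLow20, h1, Ne.symm h1, Ne.symm h2, Ne.symm h3, Ne.symm h4, Ne.symm h5, Ne.symm h6, Ne.symm h7, Ne.symm h8, Ne.symm h9, Ne.symm h10, Ne.symm h11, Ne.symm h12, Ne.symm h13, Ne.symm h14, Ne.symm h15, Ne.symm h16,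 Ne.symm h17, Ne.symm h18, Ne.symm h19, Ne.symm h20, h1, h2, h3, h4, h5, h6, h7, h8, h9, h10, h11, h12, h13, h14, h15, h16, h17, h18, h19, h20]

-- ===== VERDICT (by name: the statement is the Claim_ definition above) =====
theorem canonicalize_app_id_spec : Claim_equal_canonicalize_app_id := by
  intro app_id lookup _
  unfold Spec_canonicalize_app_id canonicalize_app_id canonicalize_app_id_alt
  match app_id with
  | none => rfl
  | some s =>
    by_cases h1 : s.isEmpty <;> simp only [h1, Bool.false_eq_true, if_true, if_false]
    by_cases h2 : (PySem.Str.strip s).isEmpty <;> simp only [h2, Bool.false_eq_true, if_true, if_false]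
    by_cases h3 : pvLookupHas lookup (PySem.Str.lower (PySem.Str.strip s)) <;>
      simp only [h3, Bool.false_eq_true, if_true, if_false]
    · rw [pvResolve_eq]
    · rw [pvSynScan_eq]
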